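-- pv_equiv track=rewrite | github.com/code-anjali/reflections_art | src/reflections_judges_platform.py | allocate_judges
-- ===== SOURCE A (Python) =====
-- from typing import Dict, Any, List
--
-- def allocate_judges(judges_expertise: Dict[str, List[str]], judges_max_workload: Dict[str, int], entry_ids, categories):
--     """
--     :param judges_max_workload: precomputed manually e.g., angel -> 15, ...
--     :param judges_expertise: anjali -> [Visual arts], angel -> [Dance, Music]
--     :param entry_ids: [1,2,3 ...]
--     :param categories: [Visual arts, Music, ...]
--     :return: anjali -> [1,2,3,4,...], angel -> [3,4,5,6,7...]
--              3 -> [anjali, angel]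
--     """
--     ja = {}
--     entry_judges: Dict[str, List[str]] = {}
--     for entry_id, category in zip(entry_ids, categories):
--         for jname, jexp in judges_expertise.items():
--             if jname not in ja:
--                 ja[jname] = []
--             if category in jexp and len(ja[jname]) < int(judges_max_workload[jname]) \
--                and (category != "Visual Arts" or len(entry_judges.get(entry_id, [])) < 2):
--                 ja[jname].append(entry_id)
--                 if entry_id not in entry_judges:
--                     entry_judges[entry_id] = []
--                 entry_judges[entry_id].append(jname)
--     return ja, entry_judges
-- ===== SOURCE B (Python) =====
-- def allocate_judges(judges_expertise, judges_max_workload, entry_ids, categories):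
--     # Build category -> [judges] index once, then allocate entries via the index.
--     by_cat = {}
--     for jname, jexp in judges_expertise.items():
--         for cat in jexp:
--             by_cat.setdefault(cat, [])
--             if jname not in by_cat[cat]:
--                 by_cat[cat].append(jname)
--     ja = {jname: [] for jname in judges_expertise}
--     entry_judges = {}
--     for entry_id, category in zip(entry_ids, categories):
--         for jname in by_cat.get(category, []):
--             if len(ja[jname]) < int(judges_max_workload[jname]) \
--                and (category != "Visual Arts" or len(entry_judges.get(entry_id, [])) < 2):
--                 ja[jname].append(entry_id)
--                 entry_judges.setdefault(entry_id, []).append(jname)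
--     return ja, entry_judges
-- ===== Notes on version B (the rewrite author's own statement) =====
-- stated objective: alternative
-- what changed: B builds a category-to-judges index and a pre-initialized judge dict in one pass over judges_expertise, then allocates each entry by scanning only the judges matching its category, instead of A's rescan of every judge (with lazy dict initialization) for every entry.
-- outside the precondition, e.g. on allocate_judges({'a': ['X']}, {}, [], []): A returns ({}, {}), B returns ({'a': []}, {})
import Mathlib
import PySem

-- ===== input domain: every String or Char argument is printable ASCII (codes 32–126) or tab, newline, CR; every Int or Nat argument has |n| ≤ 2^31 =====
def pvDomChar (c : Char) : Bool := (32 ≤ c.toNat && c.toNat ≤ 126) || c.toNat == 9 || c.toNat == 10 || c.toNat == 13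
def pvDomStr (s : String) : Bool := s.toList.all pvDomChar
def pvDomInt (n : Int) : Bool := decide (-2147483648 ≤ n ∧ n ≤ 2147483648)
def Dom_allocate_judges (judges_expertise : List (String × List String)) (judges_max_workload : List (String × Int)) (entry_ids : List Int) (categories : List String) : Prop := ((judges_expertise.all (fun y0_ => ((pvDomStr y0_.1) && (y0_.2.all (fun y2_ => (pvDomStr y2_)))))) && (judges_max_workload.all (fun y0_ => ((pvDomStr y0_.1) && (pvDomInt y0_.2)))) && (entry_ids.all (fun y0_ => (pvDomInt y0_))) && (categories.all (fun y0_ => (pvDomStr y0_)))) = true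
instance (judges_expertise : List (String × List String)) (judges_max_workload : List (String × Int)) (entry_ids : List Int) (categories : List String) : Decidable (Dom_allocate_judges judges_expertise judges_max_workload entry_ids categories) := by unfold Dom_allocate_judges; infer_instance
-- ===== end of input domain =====

-- ===== PORT A =====
-- B re-implements A with a category->judges index and pre-initialized judge dict; equivalence on Pre_ (A's KeyError inputs and the no-entries corner excluded).
def ajStepA (wkD : PySem.Dict String Int) (e : Int) (c : String)
    (st : PySem.Dict String (List Int) × PySem.Dict Int (List String)) (q : String × List String) :
    PySem.Dict String (List Int) × PySem.Dict Int (List String) :=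
  let ja := if st.1.contains q.1 then st.1 else st.1.insert q.1 []
  if q.2.contains c && decide (((ja.getD q.1 []).length : Int) < wkD.getD q.1 0)
      && (!(c == "Visual Arts") || decide (((st.2.getD e []).length : Int) < 2))
  then (ja.modify q.1 [] (· ++ [e]), st.2.modify e [] (· ++ [q.1]))
  else (ja, st.2)

def allocate_judges (judges_expertise : List (String × List String)) (judges_max_workload : List (String × Int)) (entry_ids : List Int) (categories : List String) : (List (String × List Int)) × (List (Int × List String)) :=
  let jeD := PySem.Dict.ofList judges_expertise
  let wkD := PySem.Dict.ofList judges_max_workload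
  let st := (entry_ids.zip categories).foldl
    (fun st p => jeD.items.foldl (ajStepA wkD p.1 p.2) st)
    ((PySem.Dict.empty : PySem.Dict String (List Int)), (PySem.Dict.empty : PySem.Dict Int (List String)))
  (st.1.items, st.2.items)

-- ===== PORT B =====
def ajAddCat (j : String) (d : PySem.Dict String (List String)) (c : String) : PySem.Dict String (List String) :=
  let d := d.setdefault c []
  if (d.getD c []).contains j then d else d.modify c [] (· ++ [j])

def ajIndex (L : List (String × List String)) : PySem.Dict String (List String) :=
  L.foldl (fun d q => q.2.foldl (ajAddCat q.1) d) PySem.Dict.empty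

def ajInit (L : List (String × List String)) : PySem.Dict String (List Int) :=
  L.foldl (fun d q => d.insert q.1 []) PySem.Dict.empty

def ajStepB (wkD : PySem.Dict String Int) (e : Int) (c : String)
    (st : PySem.Dict String (List Int) × PySem.Dict Int (List String)) (j : String) :
    PySem.Dict String (List Int) × PySem.Dict Int (List String) :=
  if decide (((st.1.getD j []).length : Int) < wkD.getD j 0)
      && (!(c == "Visual Arts") || decide (((st.2.getD e []).length : Int) < 2))
  then (st.1.modify j [] (· ++ [e]), st.2.modify e [] (· ++ [j]))
  else st

def allocate_judges_alt (judges_expertise : List (String × List String)) (judges_max_workload : List (String × Int)) (entry_ids : List Int) (categories : List String) : (List (String × List Int)) × (List (Int × List String)) :=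
  let jeD := PySem.Dict.ofList judges_expertise
  let wkD := PySem.Dict.ofList judges_max_workload
  let byCat := ajIndex jeD.items
  let st := (entry_ids.zip categories).foldl
    (fun st p => (byCat.getD p.2 []).foldl (ajStepB wkD p.1 p.2) st)
    (ajInit jeD.items, (PySem.Dict.empty : PySem.Dict Int (List String)))
  (st.1.items, st.2.items)

-- ===== PRECONDITION & SPEC =====
-- Pre_ excludes (a) inputs where A raises KeyError (an allocated entry's category lies in the expertise of a judge missing
-- from judges_max_workload) and (b) the no-entries corner (zip empty but judges present), where A's ja omits all judges
-- while B lists every judge with an empty workload -- both defensible readings of an unspecified corner.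
def Pre_allocate_judges (judges_expertise : List (String × List String)) (judges_max_workload : List (String × Int)) (entry_ids : List Int) (categories : List String) : Prop :=
  (∀ p ∈ entry_ids.zip categories, ∀ q ∈ (PySem.Dict.ofList judges_expertise).items,
      p.2 ∈ q.2 → (PySem.Dict.ofList judges_max_workload).contains q.1 = true)
  ∧ (entry_ids.zip categories ≠ [] ∨ judges_expertise = [])
instance (judges_expertise : List (String × List String)) (judges_max_workload : List (String × Int)) (entry_ids : List Int) (categories : List String) : Decidable (Pre_allocate_judges judges_expertise judges_max_workload entry_ids categories) := by unfold Pre_allocate_judges; infer_instance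

def pvWitness_allocate_judges : (List (String × List String)) × (List (String × Int)) × List Int × List String :=
  ([("anjali", ["Visual Arts"]), ("angel", ["Dance", "Music"])], [("anjali", 2), ("angel", 1)], [1, 2], ["Music", "Visual Arts"])

def Spec_allocate_judges (judges_expertise : List (String × List String)) (judges_max_workload : List (String × Int)) (entry_ids : List Int) (categories : List String) (out : (List (String × List Int)) × (List (Int × List String))) : Prop := out = allocate_judges_alt judges_expertise judges_max_workload entry_ids categories
instance (judges_expertise : List (String × List String)) (judges_max_workload : List (String × Int)) (entry_ids : List Int) (categories : List String) (out : (List (String × List Int)) × (List (Int × List String))) : Decidable (Spec_allocate_judges judges_expertise judges_max_workload entry_ids categories out) := by unfold Spec_allocate_judges; infer_instance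

-- ===== CLAIM (what is proved, stated in full; the proofs are below) =====
def Claim_equal_allocate_judges : Prop := ∀ (judges_expertise : List (String × List String)) (judges_max_workload : List (String × Int)) (entry_ids : List Int) (categories : List String), Dom_allocate_judges judges_expertise judges_max_workload entry_ids categories → Pre_allocate_judges judges_expertise judges_max_workload entry_ids categories → Spec_allocate_judges judges_expertise judges_max_workload entry_ids categories (allocate_judges judges_expertise judges_max_workload entry_ids categories)

-- ===== LEMMAS AND PROOFS =====

-- inserting a batch of fresh keys commutes with everything at a key not in the batch
def ajInsJ (L : List (String × List String)) (d : PySem.Dict String (List Int)) : PySem.Dict String (List Int) :=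
  L.foldl (fun d q => d.insert q.1 []) d

theorem ajInsJ_get? (L : List (String × List String)) (d : PySem.Dict String (List Int)) (k : String)
    (h : k ∉ L.map (·.1)) : (ajInsJ L d).get? k = d.get? k := by
  induction L generalizing d with
  | nil => rfl
  | cons q L ih =>
    simp only [List.map_cons, List.mem_cons, not_or] at h
    show (ajInsJ L (d.insert q.1 [])).get? k = d.get? k
    rw [ih _ h.2, PySem.Dict.get?_insert_of_ne _ _ h.1]

theorem ajInsJ_contains_of (L : List (String × List String)) (d : PySem.Dict String (List Int)) (k : String)
    (h : k ∈ L.map (·.1) ∨ d.contains k = true) : (ajInsJ L d).contains k = true := by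
  induction L generalizing d with
  | nil => simpa using h
  | cons q L ih =>
    show (ajInsJ L (d.insert q.1 [])).contains k = true
    apply ih
    rcases h with h | h
    · simp only [List.map_cons, List.mem_cons] at h
      rcases h with h | h
      · right; rw [PySem.Dict.contains_insert]; simp [h]
      · left; exact h
    · right; rw [PySem.Dict.contains_insert]; simp [h]

theorem aj_insert_comm (d : PySem.Dict String (List Int)) (k j : String) (v w : List Int)
    (hk : d.contains k = true) (hne : j ≠ k) :
    (d.insert k v).insert j w = (d.insert j w).insert k v := by
  apply PySem.Dict.ext
  have hjk : (j == k) = false := by simp [hne]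
  by_cases hj : d.contains j = true
  · rw [PySem.Dict.items_insert_of_contains _ _ (by rw [PySem.Dict.contains_insert, hjk]; simpa using hj),
        PySem.Dict.items_insert_of_contains _ _ hk,
        PySem.Dict.items_insert_of_contains _ _ (by rw [PySem.Dict.contains_insert]; simp [hk]),
        PySem.Dict.items_insert_of_contains _ _ hj,
        List.map_map, List.map_map]
    apply List.map_congr_left
    intro p _
    by_cases hpk : (p.1 == k) = true
    · have hpj : (p.1 == j) = false := by
        have hp : p.1 = k := by simpa using hpk
        simp [hp, Ne.symm hne]
      simp [Function.comp, hpk, hpj]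
      intro h
      exact absurd h.symm hne
    · by_cases hpj : (p.1 == j) = true
      · have hkj : (k == j) = false := by simp [Ne.symm hne]
        simp [Function.comp, hpk, hpj]
        intro h
        exact absurd h hne
      · simp [Function.comp, hpk, hpj]
  · have hjf : d.contains j = false := by simpa using hj
    rw [PySem.Dict.items_insert_of_not_contains _ _ (by rw [PySem.Dict.contains_insert, hjk, hjf]; rfl),
        PySem.Dict.items_insert_of_contains _ _ hk,
        PySem.Dict.items_insert_of_contains _ _ (by rw [PySem.Dict.contains_insert]; simp [hk]),
        PySem.Dict.items_insert_of_not_contains _ _ hjf,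
        List.map_append]
    simp
    intro h
    exact absurd h hne

theorem ajInsJ_insert (L : List (String × List String)) (d : PySem.Dict String (List Int)) (k : String) (v : List Int)
    (hk : d.contains k = true) (hfresh : k ∉ L.map (·.1)) :
    ajInsJ L (d.insert k v) = (ajInsJ L d).insert k v := by
  induction L generalizing d with
  | nil => rfl
  | cons q L ih =>
    simp only [List.map_cons, List.mem_cons, not_or] at hfresh
    show ajInsJ L ((d.insert k v).insert q.1 []) = (ajInsJ L (d.insert q.1 [])).insert k v
    rw [aj_insert_comm d k q.1 v [] hk (Ne.symm hfresh.1)]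
    exact ih (d.insert q.1 []) (by rw [PySem.Dict.contains_insert]; simp [hk]) hfresh.2

theorem ajAddCat_getD (j : String) (d : PySem.Dict String (List String)) (c c0 : String) :
    (ajAddCat j d c0).getD c [] =
      if c = c0 then (if j ∈ d.getD c0 [] then d.getD c0 [] else d.getD c0 [] ++ [j]) else d.getD c [] := by
  unfold ajAddCat
  by_cases h0 : d.contains c0 = true
  · rw [PySem.Dict.setdefault_of_contains _ _ h0]
    by_cases hj : j ∈ d.getD c0 []
    · rw [if_pos (List.contains_iff_mem.mpr hj)]
      by_cases hc : c = c0
      · subst hc; simp [hj]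
      · simp [hc]
    · rw [if_neg (by simpa [List.contains_iff_mem] using hj), PySem.Dict.getD_modify]
      by_cases hc : c = c0
      · subst hc; simp [hj]
      · simp [hc]
  · have h0f : d.contains c0 = false := by simpa using h0
    rw [PySem.Dict.setdefault_of_not_contains _ _ h0f,
        PySem.Dict.getD_of_not_contains _ _ h0f,
        if_neg (by simp [PySem.Dict.getD_insert_self]),
        PySem.Dict.getD_modify]
    by_cases hc : c = c0
    · subst hc; simp [PySem.Dict.getD_insert_self]
    · simp [hc, PySem.Dict.getD_insert]

theorem ajFoldCats_getD (cs : List String) (j : String) (d : PySem.Dict String (List String)) (c : String) :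
    (cs.foldl (ajAddCat j) d).getD c [] =
      if c ∈ cs ∧ j ∉ d.getD c [] then d.getD c [] ++ [j] else d.getD c [] := by
  induction cs generalizing d with
  | nil => simp
  | cons c0 cs ih =>
    show ((cs.foldl (ajAddCat j) (ajAddCat j d c0)).getD c []) = _
    rw [ih, ajAddCat_getD]
    by_cases hc : c = c0
    · subst hc
      by_cases hj : j ∈ d.getD c []
      · simp [hj]
      · simp [hj]
    · rw [if_neg hc]
      simp [List.mem_cons, hc]

theorem ajIndexFold_getD (L : List (String × List String)) (d : PySem.Dict String (List String)) (c : String)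
    (hfresh : ∀ q ∈ L, ∀ cc, q.1 ∉ d.getD cc []) (hnd : (L.map (·.1)).Nodup) :
    (L.foldl (fun d q => q.2.foldl (ajAddCat q.1) d) d).getD c [] =
      d.getD c [] ++ (L.filter (fun q => q.2.contains c)).map (·.1) := by
  induction L generalizing d with
  | nil => simp
  | cons q L ih =>
    simp only [List.map_cons, List.nodup_cons] at hnd
    have hq : ∀ cc, q.1 ∉ d.getD cc [] := hfresh q (List.mem_cons_self ..)
    have hg : ∀ cc, (q.2.foldl (ajAddCat q.1) d).getD cc [] =
        if cc ∈ q.2 then d.getD cc [] ++ [q.1] else d.getD cc [] := by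
      intro cc
      rw [ajFoldCats_getD]
      by_cases h2 : cc ∈ q.2
      · rw [if_pos ⟨h2, hq cc⟩, if_pos h2]
      · rw [if_neg (by simp [h2]), if_neg h2]
    have hmem : ∀ cc x, x ∈ (q.2.foldl (ajAddCat q.1) d).getD cc [] → x ∈ d.getD cc [] ∨ x = q.1 := by
      intro cc x hx
      rw [hg cc] at hx
      by_cases h2 : cc ∈ q.2
      · rw [if_pos h2] at hx
        simpa using hx
      · rw [if_neg h2] at hx
        exact Or.inl hx
    show ((L.foldl (fun d q => q.2.foldl (ajAddCat q.1) d) (q.2.foldl (ajAddCat q.1) d)).getD c []) = _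
    rw [ih _ (by
        intro q2 hq2 cc hx
        rcases hmem cc q2.1 hx with h | h
        · exact hfresh q2 (List.mem_cons_of_mem _ hq2) cc h
        · exact hnd.1 (h ▸ List.mem_map_of_mem hq2)) hnd.2]
    rw [hg c, List.filter_cons]
    by_cases hcc : c ∈ q.2
    · rw [if_pos hcc, if_pos (List.contains_iff_mem.mpr hcc)]
      simp
    · rw [if_neg hcc, if_neg (by simp [hcc])]

theorem ajIndex_getD (L : List (String × List String)) (c : String) (hnd : (L.map (·.1)).Nodup) :
    (ajIndex L).getD c [] = (L.filter (fun q => q.2.contains c)).map (·.1) := by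
  unfold ajIndex
  rw [ajIndexFold_getD L PySem.Dict.empty c (by intro q _ cc; simp [PySem.Dict.getD_empty]) hnd]
  simp [PySem.Dict.getD_empty]

theorem innerA_eq_innerB (wkD : PySem.Dict String Int) (e : Int) (c : String)
    (L : List (String × List String)) (st : PySem.Dict String (List Int) × PySem.Dict Int (List String))
    (hfull : ∀ q ∈ L, st.1.contains q.1 = true) :
    L.foldl (ajStepA wkD e c) st =
      ((L.filter (fun q => q.2.contains c)).map (·.1)).foldl (ajStepB wkD e c) st := by
  induction L generalizing st with
  | nil => rfl
  | cons q L ih =>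
    have hc := hfull q (List.mem_cons_self ..)
    rw [List.foldl_cons, List.filter_cons]
    by_cases hq : q.2.contains c = true
    · rw [if_pos hq, List.map_cons, List.foldl_cons]
      have hA : ajStepA wkD e c st q = ajStepB wkD e c st q.1 := by
        unfold ajStepA ajStepB
        simp only [hc, if_true, hq, Bool.true_and]
      rw [hA]
      apply ih
      intro q2 hq2
      unfold ajStepB
      split
      · rw [PySem.Dict.contains_modify]
        simp [hfull q2 (List.mem_cons_of_mem _ hq2)]
      · exact hfull q2 (List.mem_cons_of_mem _ hq2)
    · have hqm : c ∉ q.2 := fun hm => hq (List.contains_iff_mem.mpr hm)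
      rw [if_neg hq]
      have hA : ajStepA wkD e c st q = st := by
        unfold ajStepA
        simp [hc, hqm]
      rw [hA]
      exact ih st fun q2 h => hfull q2 (List.mem_cons_of_mem _ h)

theorem innerA_fresh (wkD : PySem.Dict String Int) (e : Int) (c : String)
    (L : List (String × List String)) (st : PySem.Dict String (List Int) × PySem.Dict Int (List String))
    (hnd : (L.map (·.1)).Nodup) (hfresh : ∀ q ∈ L, st.1.contains q.1 = false) :
    L.foldl (ajStepA wkD e c) st =
      ((L.filter (fun q => q.2.contains c)).map (·.1)).foldl (ajStepB wkD e c) (ajInsJ L st.1, st.2) := by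
  induction L generalizing st with
  | nil => rfl
  | cons q L ih =>
    obtain ⟨d, ej⟩ := st
    simp only [List.map_cons, List.nodup_cons] at hnd
    have hfq : d.contains q.1 = false := hfresh q (List.mem_cons_self ..)
    have hndq : q.1 ∉ L.map (·.1) := hnd.1
    have hfreshT : ∀ q2 ∈ L, (d.insert q.1 []).contains q2.1 = false := by
      intro q2 hq2
      rw [PySem.Dict.contains_insert]
      have h1 : q2.1 ≠ q.1 := fun h => hndq (h ▸ List.mem_map_of_mem hq2)
      simp [h1, hfresh q2 (List.mem_cons_of_mem _ hq2)]
    have hins : ajInsJ (q :: L) d = ajInsJ L (d.insert q.1 []) := rfl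
    have hgetq : (ajInsJ L (d.insert q.1 [])).getD q.1 [] = ([] : List Int) := by
      rw [PySem.Dict.getD_eq_get?_getD, ajInsJ_get? _ _ _ hndq, ← PySem.Dict.getD_eq_get?_getD,
        PySem.Dict.getD_insert_self]
    have hA : ajStepA wkD e c (d, ej) q =
        if q.2.contains c && decide ((0 : Int) < wkD.getD q.1 0)
            && (!(c == "Visual Arts") || decide (((ej.getD e []).length : Int) < 2))
        then ((d.insert q.1 []).modify q.1 [] (· ++ [e]), ej.modify e [] (· ++ [q.1]))
        else (d.insert q.1 [], ej) := by
      unfold ajStepA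
      simp [hfq, PySem.Dict.getD_insert_self]
    rw [List.foldl_cons, hA, List.filter_cons]
    show _ = _root_.List.foldl (ajStepB wkD e c) (ajInsJ L (d.insert q.1 []), ej) _
    by_cases hq : q.2.contains c = true
    · rw [if_pos hq, List.map_cons, List.foldl_cons]
      have hB : ajStepB wkD e c (ajInsJ L (d.insert q.1 []), ej) q.1 =
          if decide ((0 : Int) < wkD.getD q.1 0)
              && (!(c == "Visual Arts") || decide (((ej.getD e []).length : Int) < 2))
          then (ajInsJ L ((d.insert q.1 []).modify q.1 [] (· ++ [e])), ej.modify e [] (· ++ [q.1]))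
          else (ajInsJ L (d.insert q.1 []), ej) := by
        unfold ajStepB
        have hm : (ajInsJ L (d.insert q.1 [])).modify q.1 [] (· ++ [e]) =
            ajInsJ L ((d.insert q.1 []).modify q.1 [] (· ++ [e])) := by
          have h1 : (ajInsJ L (d.insert q.1 [])).modify q.1 [] (· ++ [e]) =
              (ajInsJ L (d.insert q.1 [])).insert q.1 ((ajInsJ L (d.insert q.1 [])).getD q.1 [] ++ [e]) := rfl
          have h2 : (d.insert q.1 []).modify q.1 [] (· ++ [e]) =
              (d.insert q.1 []).insert q.1 ((d.insert q.1 []).getD q.1 [] ++ [e]) := rfl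
          rw [h1, h2, hgetq, PySem.Dict.getD_insert_self,
            ajInsJ_insert L _ q.1 _ (PySem.Dict.contains_insert_self _ _ _) hndq]
        simp only [hgetq, hm, List.length_nil, Int.natCast_zero]
      rw [hB, hq, Bool.true_and]
      by_cases hcond : (decide ((0 : Int) < wkD.getD q.1 0)
          && (!(c == "Visual Arts") || decide (((ej.getD e []).length : Int) < 2))) = true
      · rw [if_pos hcond, if_pos hcond]
        exact ih ((d.insert q.1 []).modify q.1 [] (· ++ [e]), ej.modify e [] (· ++ [q.1]))
          hnd.2 (by
            intro q2 hq2
            rw [PySem.Dict.contains_modify]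
            have h1 : q2.1 ≠ q.1 := fun h => hndq (h ▸ List.mem_map_of_mem hq2)
            simp [h1]
            simpa [h1] using hfreshT q2 hq2)
      · rw [if_neg hcond, if_neg hcond]
        exact ih (d.insert q.1 [], ej) hnd.2 hfreshT
    · have hqf : q.2.contains c = false := by simpa using hq
      rw [hqf]
      simp only [Bool.false_and, Bool.false_eq_true, if_false]
      exact ih (d.insert q.1 [], ej) hnd.2 hfreshT

theorem stepB_preserves (wkD : PySem.Dict String Int) (e : Int) (c : String) (ks : List String)
    (names : List String) (st : PySem.Dict String (List Int) × PySem.Dict Int (List String))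
    (h : ∀ k ∈ ks, st.1.contains k = true) :
    ∀ k ∈ ks, ((names.foldl (ajStepB wkD e c) st).1).contains k = true := by
  induction names generalizing st with
  | nil => exact h
  | cons j names ih =>
    rw [List.foldl_cons]
    apply ih
    intro k hk
    unfold ajStepB
    split
    · rw [PySem.Dict.contains_modify]
      simp [h k hk]
    · exact h k hk

theorem outer_eq (wkD : PySem.Dict String Int) (L : List (String × List String))
    (byCat : PySem.Dict String (List String))
    (hidx : ∀ c, byCat.getD c [] = (L.filter (fun q => q.2.contains c)).map (·.1))
    (pairs : List (Int × String)) (st : PySem.Dict String (List Int) × PySem.Dict Int (List String))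
    (hfull : ∀ q ∈ L, st.1.contains q.1 = true) :
    pairs.foldl (fun st p => L.foldl (ajStepA wkD p.1 p.2) st) st =
      pairs.foldl (fun st p => (byCat.getD p.2 []).foldl (ajStepB wkD p.1 p.2) st) st := by
  induction pairs generalizing st with
  | nil => rfl
  | cons p pairs ih =>
    rw [List.foldl_cons, List.foldl_cons, innerA_eq_innerB wkD p.1 p.2 L st hfull, ← hidx p.2]
    apply ih
    intro q hq
    exact stepB_preserves wkD p.1 p.2 (L.map (·.1)) _ st
      (by intro k hk
          obtain ⟨q2, hq2, rfl⟩ := List.mem_map.mp hk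
          exact hfull q2 hq2) q.1 (List.mem_map_of_mem hq)

-- ===== VERDICT (by name: the statement is the Claim_ definition above) =====
theorem allocate_judges_spec : Claim_equal_allocate_judges := by
  intro je wk eids cats _ hpre
  obtain ⟨_, hzip⟩ := hpre
  unfold Spec_allocate_judges allocate_judges allocate_judges_alt
  rcases hz : eids.zip cats with _ | ⟨p, rest⟩
  · rcases hzip with h | hje
    · exact absurd hz h
    · subst hje
      rfl
  · have hnd : (((PySem.Dict.ofList je).items).map (·.1)).Nodup := by
      have h := PySem.Dict.nodup_keys_ofList (ν := List String) je
      simpa [PySem.Dict.keys] using h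
    have hidx : ∀ c, (ajIndex (PySem.Dict.ofList je).items).getD c [] =
        (((PySem.Dict.ofList je).items).filter (fun q => q.2.contains c)).map (·.1) :=
      fun c => ajIndex_getD _ c hnd
    dsimp only
    rw [List.foldl_cons, List.foldl_cons]
    rw [innerA_fresh (PySem.Dict.ofList wk) p.1 p.2 (PySem.Dict.ofList je).items
      (PySem.Dict.empty, PySem.Dict.empty) hnd (by intro q _; exact PySem.Dict.contains_empty _)]
    rw [← hidx p.2]
    have hinit : ajInsJ (PySem.Dict.ofList je).items PySem.Dict.empty = ajInit (PySem.Dict.ofList je).items := rfl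
    rw [hinit]
    rw [outer_eq (PySem.Dict.ofList wk) (PySem.Dict.ofList je).items _ hidx rest _
      (by
        intro q hq
        exact stepB_preserves (PySem.Dict.ofList wk) p.1 p.2
          (((PySem.Dict.ofList je).items).map (·.1)) _ (ajInit (PySem.Dict.ofList je).items, PySem.Dict.empty)
          (by intro k hk; exact ajInsJ_contains_of _ _ _ (Or.inl hk)) q.1 (List.mem_map_of_mem hq))]
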